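-- pv_equiv track=rewrite | github.com/OrelShalem/advent-of-code | AOC-day5/solution2.py | build_graph_with_indegrees
-- ===== SOURCE A (Python) =====
-- from collections import defaultdict
--
-- def build_graph_with_indegrees(rules, pages):
--     graph = defaultdict(list)
--     indegrees = {page: 0 for page in pages}
--
--     # Only add edges between pages in the current update
--     for x, y in rules:
--         if x in pages and y in pages:
--             graph[x].append(y)
--             indegrees[y] += 1
--     return graph, indegrees
-- ===== SOURCE B (Python) =====
-- def build_graph_with_indegrees(rules, pages):
--     edges = [(x, y) for x, y in rules if x in pages and y in pages]
--     graph = {}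
--     for x, y in edges:
--         graph[x] = graph.get(x, []) + [y]
--     indegrees = {page: 0 for page in pages}
--     for targets in graph.values():
--         for y in targets:
--             indegrees[y] += 1
--     return graph, indegrees
-- ===== Notes on version B (the rewrite author's own statement) =====
-- stated objective: alternative
-- what changed: B first builds the filtered edge list and the adjacency index in one pass, then derives the indegrees in a separate second pass over the built graph's value lists, instead of maintaining indegrees interleaved with edge insertion.
import Mathlib
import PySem

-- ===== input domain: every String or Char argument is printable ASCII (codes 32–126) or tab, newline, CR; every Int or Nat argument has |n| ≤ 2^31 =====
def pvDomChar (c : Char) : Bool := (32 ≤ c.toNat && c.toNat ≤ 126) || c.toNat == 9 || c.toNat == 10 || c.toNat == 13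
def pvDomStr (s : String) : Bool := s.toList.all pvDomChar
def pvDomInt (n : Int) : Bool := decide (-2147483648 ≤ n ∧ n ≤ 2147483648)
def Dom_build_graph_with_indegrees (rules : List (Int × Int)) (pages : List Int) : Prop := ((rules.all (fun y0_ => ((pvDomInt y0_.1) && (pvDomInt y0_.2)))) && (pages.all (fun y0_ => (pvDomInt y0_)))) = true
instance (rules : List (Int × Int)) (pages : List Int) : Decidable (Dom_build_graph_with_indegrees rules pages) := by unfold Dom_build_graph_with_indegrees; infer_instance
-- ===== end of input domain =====

-- B builds the filtered edge list and the adjacency index first, then derives the indegrees in a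
-- separate pass over the built graph's values instead of maintaining them during edge insertion
-- (objective: alternative decomposition, same cost).

-- ===== PORT A =====
-- graph is a defaultdict(list): graph[x].append(y) = modify x [] (· ++ [y]);
-- indegrees[y] += 1 (y is always a key, since y ∈ pages) = modify y 0 (· + 1)
def build_graph_with_indegrees (rules : List (Int × Int)) (pages : List Int) :
    (List (Int × List Int)) × (List (Int × Int)) :=
  let indegrees0 : PySem.Dict Int Int := pages.foldl (fun d p => d.insert p 0) PySem.Dict.empty
  let st := rules.foldl
    (fun (st : PySem.Dict Int (List Int) × PySem.Dict Int Int) xy =>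
      if pages.contains xy.1 && pages.contains xy.2 then
        (st.1.modify xy.1 [] (fun l => l ++ [xy.2]), st.2.modify xy.2 0 (fun n => n + 1))
      else st)
    (PySem.Dict.empty, indegrees0)
  (st.1.items, st.2.items)

-- ===== PORT B =====
-- graph[x] = graph.get(x, []) + [y] = modify x [] (· ++ [y]); second pass over graph.values
def build_graph_with_indegrees_alt (rules : List (Int × Int)) (pages : List Int) :
    (List (Int × List Int)) × (List (Int × Int)) :=
  let edges := rules.filter (fun xy => pages.contains xy.1 && pages.contains xy.2)
  let graph : PySem.Dict Int (List Int) :=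
    edges.foldl (fun d xy => d.modify xy.1 [] (fun l => l ++ [xy.2])) PySem.Dict.empty
  let indegrees0 : PySem.Dict Int Int := pages.foldl (fun d p => d.insert p 0) PySem.Dict.empty
  let indegrees := graph.values.foldl
    (fun d targets => targets.foldl (fun d y => d.modify y 0 (fun n => n + 1)) d) indegrees0
  (graph.items, indegrees.items)

-- ===== PRECONDITION & SPEC =====
def Spec_build_graph_with_indegrees (rules : List (Int × Int)) (pages : List Int) (out : (List (Int × List Int)) × (List (Int × Int))) : Prop := out = build_graph_with_indegrees_alt rules pages
instance (rules : List (Int × Int)) (pages : List Int) (out : (List (Int × List Int)) × (List (Int × Int))) : Decidable (Spec_build_graph_with_indegrees rules pages out) := by unfold Spec_build_graph_with_indegrees; infer_instance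

-- ===== CLAIM (what is proved, stated in full; the proofs are below) =====
def Claim_equal_build_graph_with_indegrees : Prop := ∀ (rules : List (Int × Int)) (pages : List Int), Dom_build_graph_with_indegrees rules pages → Spec_build_graph_with_indegrees rules pages (build_graph_with_indegrees rules pages)

-- ===== LEMMAS AND PROOFS =====

-- A's single guarded loop over a pair of dicts = two independent folds over the filtered rules.
theorem pv_foldl_pair_filter {α β γ : Type} (c : γ → Bool) (f : α → γ → α) (g : β → γ → β) :
    ∀ (l : List γ) (a : α) (b : β),
      l.foldl (fun st xy => if c xy then (f st.1 xy, g st.2 xy) else st) (a, b)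
        = ((l.filter c).foldl f a, (l.filter c).foldl g b) := by
  intro l
  induction l with
  | nil => intro a b; rfl
  | cons e t ih =>
    intro a b
    by_cases h : c e = true
    · simp [h, ih]
    · simp [h, ih]

-- grouping edges by their (distinct, covering) sources is a permutation of the edges
theorem pv_group_perm (ks : List Int) :
    ∀ (edges : List (Int × Int)), ks.Nodup → (∀ e ∈ edges, e.1 ∈ ks) →
      ((ks.map (fun x => edges.filter (fun e => e.1 == x))).flatten).Perm edges := by
  induction ks with
  | nil =>
    intro edges _ hcov
    have : edges = [] := List.eq_nil_iff_forall_not_mem.mpr (fun e he => by simpa using hcov e he)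
    simp [this]
  | cons x ks ih =>
    intro edges hnd hcov
    have hx : x ∉ ks := (List.nodup_cons.mp hnd).1
    have hnd' : ks.Nodup := (List.nodup_cons.mp hnd).2
    simp only [List.map_cons, List.flatten_cons]
    have hsplit := List.filter_append_perm (fun e => e.1 == x) edges
    have hmapeq : ks.map (fun x' => edges.filter (fun e => e.1 == x'))
        = ks.map (fun x' => (edges.filter (fun e => !(e.1 == x))).filter (fun e => e.1 == x')) := by
      apply List.map_congr_left
      intro x' hx'
      have hne : x' ≠ x := fun h => hx (h ▸ hx')
      rw [List.filter_filter]
      apply List.filter_congr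
      intro e _
      by_cases hx1 : e.1 = x
      · simp [hx1, Ne.symm hne]
      · simp [hx1]
    have hrest : ((ks.map (fun x' => edges.filter (fun e => e.1 == x'))).flatten).Perm
        (edges.filter (fun e => !(e.1 == x))) := by
      rw [hmapeq]
      apply ih _ hnd'
      intro e he
      have he' := List.mem_filter.mp he
      have : e.1 ∈ x :: ks := hcov e he'.1
      rcases List.mem_cons.mp this with h | h
      · exfalso
        have hb := he'.2
        simp [h] at hb
      · exact h
    exact ((List.Perm.append_left _ hrest).trans hsplit)

-- folding the += 1 loop over a permuted list of keys that are all already present gives the same dict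
theorem pv_incr_fold_eq (d : PySem.Dict Int Int) (l1 l2 : List Int)
    (hp : l1.Perm l2) (hnd : d.keys.Nodup) (h1 : ∀ y ∈ l1, y ∈ d.keys) :
    l1.foldl (fun d y => d.modify y 0 (fun n => n + 1)) d
      = l2.foldl (fun d y => d.modify y 0 (fun n => n + 1)) d := by
  have hkeys : ∀ (l : List Int), (∀ y ∈ l, y ∈ d.keys) →
      (l.foldl (fun d y => d.modify y 0 (fun n => n + 1)) d).keys = d.keys := by
    intro l hl
    rw [PySem.Dict.keys_foldl_modify l 0 (fun _ _ => fun n => n + 1) d,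
      PySem.Set.update_eq_append_filter]
    have : (PySem.Set.ofList l).filter (fun y => !(PySem.Set.contains d.keys y)) = [] := by
      apply List.filter_eq_nil_iff.mpr
      intro y hy
      have : y ∈ d.keys := hl y ((PySem.Set.mem_ofList l y).mp hy)
      simp [PySem.Set.contains, this]
    rw [this, List.append_nil]
  have h2 : ∀ y ∈ l2, y ∈ d.keys := fun y hy => h1 y (hp.symm.mem_iff.mp hy)
  have hk1 := hkeys l1 h1
  have hk2 := hkeys l2 h2
  apply PySem.Dict.ext
  rw [PySem.Dict.items_eq_map_keys _ (hk1 ▸ hnd) 0,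
    PySem.Dict.items_eq_map_keys _ (hk2 ▸ hnd) 0, hk1, hk2]
  apply List.map_congr_left
  intro k _
  rw [PySem.Dict.getD_foldl_modify_add_one, PySem.Dict.getD_foldl_modify_add_one,
    hp.count_eq]

-- ===== VERDICT =====
theorem build_graph_with_indegrees_spec : Claim_equal_build_graph_with_indegrees := by
  intro rules pages _
  unfold Spec_build_graph_with_indegrees
  show build_graph_with_indegrees rules pages = build_graph_with_indegrees_alt rules pages
  set c : Int × Int → Bool := fun xy => pages.contains xy.1 && pages.contains xy.2 with hc
  set edges : List (Int × Int) := rules.filter c with hedges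
  set indegrees0 : PySem.Dict Int Int :=
    pages.foldl (fun d p => d.insert p 0) PySem.Dict.empty with hind0
  set graph : PySem.Dict Int (List Int) :=
    edges.foldl (fun d xy => d.modify xy.1 [] (fun l => l ++ [xy.2])) PySem.Dict.empty with hg
  -- unfold both ports (zeta-reducing the lets) and split A's pair fold
  show ((rules.foldl
      (fun (st : PySem.Dict Int (List Int) × PySem.Dict Int Int) xy =>
        if c xy then
          (st.1.modify xy.1 [] (fun l => l ++ [xy.2]), st.2.modify xy.2 0 (fun n => n + 1))
        else st)
      (PySem.Dict.empty, indegrees0)).1.items,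
    (rules.foldl
      (fun (st : PySem.Dict Int (List Int) × PySem.Dict Int Int) xy =>
        if c xy then
          (st.1.modify xy.1 [] (fun l => l ++ [xy.2]), st.2.modify xy.2 0 (fun n => n + 1))
        else st)
      (PySem.Dict.empty, indegrees0)).2.items)
    = (graph.items,
       (graph.values.foldl
          (fun d targets => targets.foldl (fun d y => d.modify y 0 (fun n => n + 1)) d)
          indegrees0).items)
  rw [pv_foldl_pair_filter c
      (fun (d : PySem.Dict Int (List Int)) xy => d.modify xy.1 [] (fun l => l ++ [xy.2]))
      (fun (d : PySem.Dict Int Int) xy => d.modify xy.2 0 (fun n => n + 1)) rules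
      PySem.Dict.empty indegrees0]
  -- the indegrees side
  -- keys of indegrees0 = the distinct pages
  have hind0keys : indegrees0.keys = PySem.Set.ofList pages := by
    rw [hind0, PySem.Dict.keys_foldl_insert pages (fun _ _ => (0 : Int)) PySem.Dict.empty,
      PySem.Dict.keys_empty, PySem.Set.update_nil_left]
  have hind0nd : indegrees0.keys.Nodup := by rw [hind0keys]; exact PySem.Set.nodup_ofList pages
  -- graph's keys = the distinct edge sources
  have hgkeys : graph.keys = PySem.Set.ofList (edges.map (fun e => e.1)) := by
    rw [hg, PySem.Dict.keys_foldl_modify_key edges (fun e => e.1) []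
      (fun _ xy => fun l => l ++ [xy.2]) PySem.Dict.empty,
      PySem.Dict.keys_empty, PySem.Set.update_nil_left]
  have hgnd : graph.keys.Nodup := by rw [hgkeys]; exact PySem.Set.nodup_ofList _
  -- graph.values.flatten is a permutation of the edge targets, in edge order
  have hperm : (graph.values.flatten).Perm (edges.map (fun e => e.2)) := by
    have hv : graph.values
        = graph.keys.map (fun x => (edges.filter (fun e => e.1 == x)).map (fun e => e.2)) := by
      rw [PySem.Dict.values_eq_map_keys graph hgnd []]
      apply List.map_congr_left
      intro x _
      rw [hg, PySem.Dict.getD_foldl_modify_append edges PySem.Dict.empty x,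
        PySem.Dict.getD_empty, List.nil_append]
    have hcov : ∀ e ∈ edges, e.1 ∈ graph.keys := by
      intro e he
      rw [hgkeys, PySem.Set.mem_ofList]
      exact List.mem_map.mpr ⟨e, he, rfl⟩
    have hbase := pv_group_perm graph.keys edges hgnd hcov
    have : graph.values.flatten
        = ((graph.keys.map (fun x => edges.filter (fun e => e.1 == x))).flatten).map
            (fun e => e.2) := by
      rw [hv, List.map_flatten, List.map_map]
      rfl
    rw [this]
    exact hbase.map _
  -- all edge targets are pages, hence keys of indegrees0
  have htgt : ∀ y ∈ edges.map (fun e => e.2), y ∈ indegrees0.keys := by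
    intro y hy
    rcases List.mem_map.mp hy with ⟨e, he, rfl⟩
    have hce : c e = true := (List.mem_filter.mp (hedges ▸ he)).2
    simp only [hc, Bool.and_eq_true] at hce
    rw [hind0keys, PySem.Set.mem_ofList]
    exact List.contains_iff_mem.mp hce.2
  have hsecond : (List.foldl (fun d xy => d.modify xy.2 0 (fun n => n + 1)) indegrees0 edges)
      = (graph.values.foldl
          (fun d targets => targets.foldl (fun d y => d.modify y 0 (fun n => n + 1)) d)
          indegrees0) := by
    rw [← List.foldl_flatten]
    have hA : List.foldl (fun d xy => d.modify xy.2 0 (fun n => n + 1)) indegrees0 edges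
        = List.foldl (fun d y => d.modify y 0 (fun n => n + 1)) indegrees0
            (edges.map (fun e => e.2)) :=
      (@List.foldl_map (Int × Int) Int (PySem.Dict Int Int) (fun e => e.2)
        (fun d y => d.modify y 0 (fun n => n + 1)) edges indegrees0).symm
    rw [hA, pv_incr_fold_eq indegrees0 (edges.map (fun e => e.2)) graph.values.flatten
      hperm.symm hind0nd htgt]
  show ((List.foldl (fun d xy => d.modify xy.1 [] (fun l => l ++ [xy.2])) PySem.Dict.empty
      edges).items,
    (List.foldl (fun d xy => d.modify xy.2 0 (fun n => n + 1)) indegrees0 edges).items)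
      = (graph.items,
        (graph.values.foldl
          (fun d targets => targets.foldl (fun d y => d.modify y 0 (fun n => n + 1)) d)
          indegrees0).items)
  rw [hsecond]
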